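-- pv_equiv track=rewrite | github.com/konicaRu/python_study1 | SumOfThe.py | SumOfThe
-- ===== SOURCE A (Python) =====
-- def SumOfThe(N, data):
--     summ = 0
--     court = -1
--     for j in range(len(data)):
--         court += 1
--         for i in range(len(data)):
--             summ += data[i]
--         summ -= data[court]
--         if summ == 0:
--             return data[court]
--         if summ == data[court]:
--             return summ
--         if summ != data[court]:
--             summ = 0
-- ===== SOURCE B (Python) =====
-- def SumOfThe(N, data):
--     total = sum(data)
--     for x in data:
--         rest = total - x
--         if rest == 0:
--             return x
--         if rest == x:
--             return rest
--     return None
-- ===== Notes on version B (the rewrite author's own statement) =====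
-- stated objective: faster
-- what changed: B computes the total sum once and checks total-x per element in a single pass, replacing A's inner re-summation of the whole list on every iteration.
import Mathlib
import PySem

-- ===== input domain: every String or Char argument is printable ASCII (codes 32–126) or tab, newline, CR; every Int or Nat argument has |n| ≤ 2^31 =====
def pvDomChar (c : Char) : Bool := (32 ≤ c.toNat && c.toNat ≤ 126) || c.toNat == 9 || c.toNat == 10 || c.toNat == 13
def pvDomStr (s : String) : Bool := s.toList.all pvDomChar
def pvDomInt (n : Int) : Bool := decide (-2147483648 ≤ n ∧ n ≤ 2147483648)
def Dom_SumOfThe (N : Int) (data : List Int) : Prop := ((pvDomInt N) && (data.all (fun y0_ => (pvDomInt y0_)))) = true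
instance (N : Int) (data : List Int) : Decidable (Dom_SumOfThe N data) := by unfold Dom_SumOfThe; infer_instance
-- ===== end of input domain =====

-- B replaces A's O(n^2) re-summation with one precomputed total and a single O(n) pass (return value only).

-- ===== PORT A =====
-- outer loop over j (court tracks j); summ is the carried mutable state
def SumOfTheLoop (data : List Int) : List Nat → Int → Option Int
  | [], _ => none
  | j :: js, summ =>
    -- inner loop: for i in range(len(data)): summ += data[i]
    let s1 := (List.range data.length).foldl (fun acc i => acc + data.getD i 0) summ
    let s2 := s1 - data.getD j 0
    if s2 = 0 then some (data.getD j 0)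
    else if s2 = data.getD j 0 then some s2
    else if s2 ≠ data.getD j 0 then SumOfTheLoop data js 0
    else SumOfTheLoop data js s2

def SumOfThe (N : Int) (data : List Int) : Option Int :=
  SumOfTheLoop data (List.range data.length) 0

-- ===== PORT B =====
def SumOfThe_alt (N : Int) (data : List Int) : Option Int :=
  let total := data.sum
  data.findSome? (fun x =>
    let rest := total - x
    if rest = 0 then some x
    else if rest = x then some rest
    else none)

-- ===== PRECONDITION & SPEC =====
def Spec_SumOfThe (N : Int) (data : List Int) (out : Option Int) : Prop := out = SumOfThe_alt N data
instance (N : Int) (data : List Int) (out : Option Int) : Decidable (Spec_SumOfThe N data out) := by unfold Spec_SumOfThe; infer_instance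

-- ===== CLAIM (what is proved, stated in full; the proofs are below) =====
def Claim_equal_SumOfThe : Prop := ∀ (N : Int) (data : List Int), Dom_SumOfThe N data → Spec_SumOfThe N data (SumOfThe N data)

-- ===== LEMMAS AND PROOFS =====

theorem foldl_add_sum (l : List Int) (c : Int) : l.foldl (fun a x => a + x) c = c + l.sum := by
  induction l generalizing c with
  | nil => simp
  | cons x xs ih => simp [List.foldl, ih, List.sum_cons]; ring

theorem map_getD_range (l : List Int) : (List.range l.length).map (fun i => l.getD i 0) = l := by
  apply List.ext_getElem
  · simp
  · intro i h1 h2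
    simp [List.getD, List.getElem?_eq_getElem h2]

theorem foldl_range_sum (l : List Int) (c : Int) :
    (List.range l.length).foldl (fun acc i => acc + l.getD i 0) c = c + l.sum := by
  have h := foldl_add_sum ((List.range l.length).map (fun i => l.getD i 0)) c
  rw [List.foldl_map] at h
  rw [h, map_getD_range]

theorem loop_eq_findSome (data : List Int) (js : List Nat) :
    SumOfTheLoop data js 0 =
      (js.map (fun j => data.getD j 0)).findSome? (fun x =>
        if data.sum - x = 0 then some x
        else if data.sum - x = x then some (data.sum - x)
        else none) := by
  induction js with
  | nil => simp [SumOfTheLoop]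
  | cons j js ih =>
    simp only [SumOfTheLoop, List.map_cons, List.findSome?_cons, foldl_range_sum, zero_add]
    split_ifs with h1 h2 <;> simp_all

theorem SumOfThe_eq (N : Int) (data : List Int) : SumOfThe N data = SumOfThe_alt N data := by
  unfold SumOfThe SumOfThe_alt
  rw [loop_eq_findSome, map_getD_range]

-- ===== VERDICT (by name: the statement is the Claim_ definition above) =====
theorem SumOfThe_spec : Claim_equal_SumOfThe := by
  intro N data _
  unfold Spec_SumOfThe
  exact SumOfThe_eq N data
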